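-- pv_equiv track=rewrite | github.com/haxung/merge-xlsx | xlsx2pdf.py | sort_string_array
-- ===== SOURCE A (Python) =====
-- import functools
--
-- def sort_string_array(strs, order):
-- 	# 自定义比较函数
-- 	def compare(s1, s2):
-- 		a , b = 0, 0
-- 		for i, char in enumerate(order):
-- 			if char in s1:
-- 				a = i
-- 			if char in s2:
-- 				b = i
--
-- 		return a - b
--
-- 	# 使用自定义比较函数排序
-- 	strs.sort(key=functools.cmp_to_key(compare))
--
-- 	return strs
-- ===== SOURCE B (Python) =====
-- def sort_string_array(strs, order):
--     # Bucket (counting) sort on the per-string key "last index i with order[i] in s, default 0".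
--     # Mutates strs in place (strs[:] = ...) just as A's .sort() does, and returns it.
--     n = len(order)
--     if n == 0:
--         return strs
--     buckets = [[] for _ in range(n)]
--     for s in strs:
--         k = 0
--         for i, ch in enumerate(order):
--             if ch in s:
--                 k = i
--         buckets[k].append(s)
--     strs[:] = [s for b in buckets for s in b]
--     return strs
-- ===== Notes on version B (the rewrite author's own statement) =====
-- stated objective: faster
-- what changed: Replaces the comparator-based sort (functools.cmp_to_key, whose compare rescans order and both strings on every comparison) by computing each string's key once and stably bucket-sorting into one bucket per order index.
import Mathlib
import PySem

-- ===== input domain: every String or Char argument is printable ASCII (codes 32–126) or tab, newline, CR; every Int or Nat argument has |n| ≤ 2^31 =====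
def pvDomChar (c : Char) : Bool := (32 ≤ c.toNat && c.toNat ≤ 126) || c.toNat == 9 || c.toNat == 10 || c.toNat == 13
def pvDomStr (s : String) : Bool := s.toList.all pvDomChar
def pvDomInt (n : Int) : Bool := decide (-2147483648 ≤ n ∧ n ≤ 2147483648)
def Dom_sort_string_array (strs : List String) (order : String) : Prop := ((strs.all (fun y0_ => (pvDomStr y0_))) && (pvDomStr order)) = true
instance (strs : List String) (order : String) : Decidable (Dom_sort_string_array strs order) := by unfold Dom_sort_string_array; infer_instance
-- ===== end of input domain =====

-- B replaces A's comparator sort (cmp_to_key) by computing each key once and bucket-sorting; both Pythons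
-- mutate strs in place and return it (same side effect) — the equivalence proved is about the returned list.

-- ===== PORT A =====
-- the per-string half of A's compare: the loop 'for i, char in enumerate(order): if char in s: a = i' from a = 0,
-- shared verbatim by B's key loop. The index is a Nat (Python's enumerate yields 0,1,2,…; Nat and Int order agree here).
def pvKey (order : List Char) (s : List Char) : Nat :=
  (PySem.List.enumerate order 0).foldl
    (fun a ic => if PySem.Chars.isIn [ic.2] s then ic.1.toNat else a) 0

-- functools.cmp_to_key(compare) with compare s1 s2 = a - b, a/b the per-string loop values above, is exactly
-- the stable sort by that per-string key (compare < 0 ↔ key s1 < key s2), i.e. PySem.List.sorted with that key.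
def sort_string_array (strs : List String) (order : String) : List String :=
  PySem.List.sorted strs (fun s => pvKey order.toList s.toList) false

-- ===== PORT B =====
def sort_string_array_alt (strs : List String) (order : String) : List String :=
  let n := order.toList.length
  if n = 0 then strs
  else
    (strs.foldl
      (fun bs s =>
        let k := pvKey order.toList s.toList
        bs.set k (PySem.List.pyGetD bs (k : Int) [] ++ [s]))
      (List.replicate n [])).flatten

-- ===== PRECONDITION & SPEC =====
def Spec_sort_string_array (strs : List String) (order : String) (out : List String) : Prop := out = sort_string_array_alt strs order
instance (strs : List String) (order : String) (out : List String) : Decidable (Spec_sort_string_array strs order out) := by unfold Spec_sort_string_array; infer_instance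

-- ===== CLAIM (what is proved, stated in full; the proofs are below) =====
def Claim_equal_sort_string_array : Prop := ∀ (strs : List String) (order : String), Dom_sort_string_array strs order → Spec_sort_string_array strs order (sort_string_array strs order)

-- ===== LEMMAS AND PROOFS =====

-- the key loop returns 0 or one of the enumerated indices
theorem foldl_if_toNat_fst_mem {p : Int × Char → Bool} (l : List (Int × Char)) (init : Nat) :
    l.foldl (fun a ic => if p ic then ic.1.toNat else a) init = init ∨
      l.foldl (fun a ic => if p ic then ic.1.toNat else a) init ∈ l.map (fun ic => ic.1.toNat) := by
  induction l generalizing init with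
  | nil => left; rfl
  | cons hd tl ih =>
    simp only [List.foldl_cons, List.map_cons, List.mem_cons]
    rcases ih (if p hd then hd.1.toNat else init) with h | h
    · rw [h]; split_ifs with hp
      · right; left; rfl
      · left; rfl
    · right; right; exact h

theorem pvKey_lt (order : List Char) (s : List Char) (h : order ≠ []) :
    pvKey order s < order.length := by
  unfold pvKey
  rcases foldl_if_toNat_fst_mem (p := fun ic => PySem.Chars.isIn [ic.2] s)
      (PySem.List.enumerate order 0) 0 with h0 | hm
  · rw [h0]; exact List.length_pos_of_ne_nil h
  · rw [List.mem_map] at hm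
    obtain ⟨ic, hic, hv⟩ := hm
    rw [PySem.List.mem_enumerate_iff] at hic
    obtain ⟨k, hk, rfl⟩ := hic
    omega

-- stable insertion into the concatenation L ++ R, all of L with key ≤ key x, all of R with key > key x
theorem insertBy_middle {α : Type} (k : α → Nat) (x : α) (L R : List α)
    (hL : ∀ y ∈ L, ¬ k x < k y) (hR : ∀ y ∈ R, k x < k y) :
    PySem.List.insertBy (fun a b => decide (k a < k b)) x (L ++ R) = L ++ x :: R := by
  induction L with
  | nil =>
    simp only [List.nil_append]
    cases R with
    | nil => rfl
    | cons y ys =>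
      have hy : k x < k y := hR y (by simp)
      rw [PySem.List.insertBy, if_pos (by simpa using hy)]
  | cons y ys ih =>
    have hy : ¬ k x < k y := hL y (by simp)
    rw [List.cons_append, PySem.List.insertBy, if_neg (by simpa using hy)]
    rw [ih (fun z hz => hL z (by simp [hz]))]
    simp

-- counting-sort characterisation of PySem's stable sort for a Nat key bounded by n
theorem sorted_eq_buckets {α : Type} (k : α → Nat) (n : Nat) (xs : List α)
    (h : ∀ x ∈ xs, k x < n) :
    PySem.List.sorted xs k false =
      ((List.range n).map (fun j => xs.filter (fun x => k x = j))).flatten := by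
  induction xs using List.reverseRecOn with
  | nil => simp [PySem.List.sorted]
  | append_singleton xs x ih =>
    have hx : k x < n := h x (by simp)
    have hxs : ∀ y ∈ xs, k y < n := fun y hy => h y (by simp [hy])
    rw [PySem.List.sorted_eq_foldl_insertBy, List.foldl_append, List.foldl_cons, List.foldl_nil,
      ← PySem.List.sorted_eq_foldl_insertBy, ih hxs]
    -- split the buckets at index k x + 1
    have h1 : (List.range n).take (k x + 1) = List.range (k x + 1) := by
      rw [List.take_range]; congr 1; omega
    have h2 : (List.range n).drop (k x + 1) = List.range' (k x + 1) (n - (k x + 1)) := by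
      rw [List.range_eq_range', List.drop_range']; simp
    have hsplit : List.range n = List.range (k x + 1) ++ List.range' (k x + 1) (n - (k x + 1)) := by
      rw [← h1, ← h2, List.take_append_drop]
    set L := ((List.range (k x + 1)).map (fun j => xs.filter (fun y => k y = j))).flatten with hLdef
    set R := ((List.range' (k x + 1) (n - (k x + 1))).map (fun j => xs.filter (fun y => k y = j))).flatten with hRdef
    have hL : ∀ y ∈ L, ¬ k x < k y := by
      intro y hy
      simp only [hLdef, List.mem_flatten, List.mem_map] at hy
      obtain ⟨b, ⟨j, hj, rfl⟩, hyb⟩ := hy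
      rw [List.mem_range] at hj
      have := (List.mem_filter.mp hyb).2
      simp only [decide_eq_true_eq] at this
      omega
    have hR : ∀ y ∈ R, k x < k y := by
      intro y hy
      simp only [hRdef, List.mem_flatten, List.mem_map] at hy
      obtain ⟨b, ⟨j, hj, rfl⟩, hyb⟩ := hy
      rw [List.mem_range'] at hj
      have := (List.mem_filter.mp hyb).2
      simp only [decide_eq_true_eq] at this
      omega
    rw [hsplit]
    simp only [List.map_append, List.flatten_append, ← hLdef, ← hRdef]
    rw [insertBy_middle k x L R hL hR]
    -- the bucket concatenation for xs ++ [x]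
    have hfilter : ∀ j : Nat, (xs ++ [x]).filter (fun y => k y = j) =
        xs.filter (fun y => k y = j) ++ (if k x = j then [x] else []) := by
      intro j; rw [List.filter_append]; split_ifs with hj <;> simp [List.filter, hj]
    have hLx : ((List.range (k x + 1)).map (fun j => (xs ++ [x]).filter (fun y => k y = j))).flatten
        = L ++ [x] := by
      rw [List.range_succ]
      simp only [List.map_append, List.flatten_append, List.map_cons, List.map_nil,
        List.flatten_cons, List.flatten_nil]
      have h1 : (List.range (k x)).map (fun j => (xs ++ [x]).filter (fun y => k y = j)) =
          (List.range (k x)).map (fun j => xs.filter (fun y => k y = j)) := by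
        apply List.map_congr_left
        intro j hj
        rw [List.mem_range] at hj
        rw [hfilter j, if_neg (by omega), List.append_nil]
      rw [h1, hfilter (k x), if_pos rfl]
      rw [hLdef, List.range_succ]
      simp [List.append_assoc]
    have hRx : ((List.range' (k x + 1) (n - (k x + 1))).map
          (fun j => (xs ++ [x]).filter (fun y => k y = j))).flatten = R := by
      rw [hRdef]
      congr 1
      apply List.map_congr_left
      intro j hj
      rw [List.mem_range'] at hj
      rw [hfilter j, if_neg (by omega), List.append_nil]
    rw [hLx, hRx]
    simp

-- B's bucket-filling loop computes, bucket by bucket, the filters of the input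
theorem foldl_buckets (k : String → Nat) (xs : List String) :
    ∀ bs : List (List String), (∀ x ∈ xs, k x < bs.length) →
      xs.foldl (fun bs s => bs.set (k s) (PySem.List.pyGetD bs ((k s : Nat) : Int) [] ++ [s])) bs =
        (List.range bs.length).map (fun j => bs.getD j [] ++ xs.filter (fun x => k x = j)) := by
  induction xs with
  | nil =>
    intro bs _
    simp only [List.foldl_nil, List.filter_nil, List.append_nil]
    apply List.ext_getElem (by simp)
    intro i h1 h2
    simp [List.getD_eq_getElem?_getD, List.getElem?_eq_getElem (by simpa using h2)]
  | cons x xs ih =>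
    intro bs hlen
    have hx : k x < bs.length := hlen x (by simp)
    have hget : PySem.List.pyGetD bs ((k x : Nat) : Int) [] = bs.getD (k x) [] := by
      rw [PySem.List.pyGetD_natCast]
    set bs' := bs.set (k x) (bs.getD (k x) [] ++ [x]) with hbs'
    have hlen' : bs'.length = bs.length := by simp [hbs']
    rw [List.foldl_cons, hget, ← hbs', ih bs' (by rw [hlen']; exact fun y hy => hlen y (by simp [hy])), hlen']
    apply List.map_congr_left
    intro j hj
    rw [List.mem_range] at hj
    by_cases hjx : j = k x
    · subst hjx
      have hset : bs'.getD (k x) [] = bs.getD (k x) [] ++ [x] := by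
        simp [hbs', List.getD_eq_getElem?_getD, hx]
      rw [hset, List.filter_cons, if_pos (by simp)]
      simp [List.append_assoc]
    · have hset : bs'.getD j [] = bs.getD j [] := by
        simp only [hbs', List.getD_eq_getElem?_getD, List.getElem?_set]
        rw [if_neg (fun h => hjx h.symm)]
      rw [hset, List.filter_cons, if_neg (by simp only [decide_eq_true_eq]; omega)]

-- empty order: the key is constantly 0, so A's stable sort leaves strs unchanged
theorem sorted_const_zero (strs : List String) :
    PySem.List.sorted strs (fun _ : String => (0 : Nat)) false = strs := by
  apply PySem.List.sorted_eq_self_of_pairwise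
  induction strs with
  | nil => exact List.Pairwise.nil
  | cons h t ih => exact List.Pairwise.cons (fun _ _ => le_refl 0) ih

-- ===== VERDICT (by name: the statement is the Claim_ definition above) =====
theorem sort_string_array_spec : Claim_equal_sort_string_array := by
  intro strs order _
  unfold Spec_sort_string_array sort_string_array sort_string_array_alt
  by_cases hn : order.toList.length = 0
  · rw [if_pos hn]
    have ho : order.toList = [] := List.length_eq_zero_iff.mp hn
    have hk : (fun s : String => pvKey order.toList s.toList) = fun _ => (0 : Nat) := by
      funext s; simp [pvKey, ho]
    rw [hk]; exact sorted_const_zero strs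
  · rw [if_neg hn]
    have ho : order.toList ≠ [] := fun h => hn (by simp [h])
    have hb : ∀ s ∈ strs, pvKey order.toList s.toList < (List.replicate order.toList.length ([] : List String)).length := by
      intro s _; simpa using pvKey_lt order.toList s.toList ho
    rw [foldl_buckets (fun s => pvKey order.toList s.toList) strs _ hb]
    rw [sorted_eq_buckets (fun s => pvKey order.toList s.toList) order.toList.length strs
      (fun s _ => pvKey_lt order.toList s.toList ho)]
    simp [List.getD_eq_getElem?_getD, List.getElem?_replicate]
    congr 1
    apply List.map_congr_left
    intro j hj
    rw [List.mem_range] at hj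
    simp [hj]
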